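-- pv_equiv track=rewrite | github.com/OliCunnington/hackerrank | python3/sherlock_and_pairs.py | solve
-- ===== SOURCE A (Python) =====
-- def solve(a):
--     # Write your code here
--     c_dict = {}
--     summation = 0
--     for x in a:
--         if x not in c_dict.keys():
--             cou = a.count(x)
--             if cou > 1:
--                 c_dict[x] = 0
--                 summation += cou * (cou-1)
--     # total = 0
--     # for x in c_dict.keys():
--     #     total += c_dict[x] * (c_dict[x] - 1)
--     # return total
--     return summation
-- ===== SOURCE B (Python) =====
-- def solve(a):
--     freq = {}
--     for x in a:
--         freq[x] = freq.get(x, 0) + 1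
--     return sum(v * (v - 1) for v in freq.values())
-- ===== Notes on version B (the rewrite author's own statement) =====
-- stated objective: faster
-- what changed: Replaces the per-new-element a.count() rescan with a single frequency-dict pass followed by a sum of v*(v-1) over the counts.
import Mathlib
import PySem

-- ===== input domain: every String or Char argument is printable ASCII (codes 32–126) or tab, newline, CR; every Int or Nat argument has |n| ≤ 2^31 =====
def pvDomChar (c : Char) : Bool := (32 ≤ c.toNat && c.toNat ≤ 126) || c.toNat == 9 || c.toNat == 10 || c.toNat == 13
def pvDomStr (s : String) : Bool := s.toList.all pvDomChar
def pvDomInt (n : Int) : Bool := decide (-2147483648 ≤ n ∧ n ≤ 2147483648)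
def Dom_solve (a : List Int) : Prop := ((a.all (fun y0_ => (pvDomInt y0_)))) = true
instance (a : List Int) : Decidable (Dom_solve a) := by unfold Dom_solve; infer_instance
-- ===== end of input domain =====

-- B replaces A's quadratic per-new-element a.count() rescan with one frequency-dict pass
-- and a sum of v*(v-1) over the counts (objective: faster).

-- ===== PORT A =====
def solve (a : List Int) : Int :=
  (a.foldl
    (fun (st : PySem.Dict Int Int × Int) x =>
      if st.1.contains x then st
      else
        let cou : Int := (a.count x : Int)
        if 1 < cou then (st.1.insert x 0, st.2 + cou * (cou - 1)) else st)
    (PySem.Dict.empty, 0)).2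

-- ===== PORT B =====
def solve_alt (a : List Int) : Int :=
  let freq : PySem.Dict Int Int :=
    a.foldl (fun d x => d.insert x (d.getD x 0 + 1)) PySem.Dict.empty
  (freq.values.map (fun v => v * (v - 1))).sum

-- ===== PRECONDITION & SPEC =====
def Spec_solve (a : List Int) (out : Int) : Prop := out = solve_alt a
instance (a : List Int) (out : Int) : Decidable (Spec_solve a out) := by unfold Spec_solve; infer_instance

-- ===== CLAIM (what is proved, stated in full; the proofs are below) =====
def Claim_equal_solve : Prop := ∀ (a : List Int), Dom_solve a → Spec_solve a (solve a)

-- ===== LEMMAS AND PROOFS =====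

-- A's loop adds, once per distinct not-yet-seen element x, c x * (c x - 1) when 1 < c x.
lemma loopA (c : Int → Int) (l : List Int) :
    ∀ (d : PySem.Dict Int Int) (s : Int),
    (l.foldl
      (fun (st : PySem.Dict Int Int × Int) x =>
        if st.1.contains x then st
        else
          let cou : Int := c x
          if 1 < cou then (st.1.insert x 0, st.2 + cou * (cou - 1)) else st)
      (d, s)).2
    = s + ∑ x ∈ l.toFinset.filter (fun x => d.contains x = false),
            (if 1 < c x then c x * (c x - 1) else 0) := by
  induction l with
  | nil => simp
  | cons y t ih =>
    intro d s
    simp only [List.foldl_cons, List.toFinset_cons]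
    by_cases h : d.contains y
    · rw [if_pos h, ih d s, Finset.filter_insert, if_neg (by simp [h])]
    · rw [if_neg h]
      by_cases hc : 1 < c y
      · simp only [hc, if_pos]
        rw [ih (d.insert y 0) (s + c y * (c y - 1))]
        have hset :
            (insert y t.toFinset).filter (fun x => d.contains x = false)
              = insert y (t.toFinset.filter (fun x => (d.insert y 0).contains x = false)) := by
          ext x
          simp only [Finset.mem_filter, Finset.mem_insert, PySem.Dict.contains_insert,
            Bool.or_eq_false_iff, beq_eq_false_iff_ne, ne_eq]
          constructor
          · rintro ⟨hx, hdx⟩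
            by_cases hxy : x = y
            · exact Or.inl hxy
            · exact Or.inr ⟨hx.resolve_left hxy, hxy, hdx⟩
          · rintro (rfl | ⟨hx, _, hdx⟩)
            · exact ⟨Or.inl rfl, by simpa using h⟩
            · exact ⟨Or.inr hx, hdx⟩
        rw [hset, Finset.sum_insert (by simp [PySem.Dict.contains_insert])]
        simp [hc]
        ring
      · simp only [hc, if_false]
        rw [ih d s, Finset.filter_insert, if_pos (by simp [h]),
          Finset.sum_insert_of_eq_zero_if_notMem (by intro _; simp [hc])]

lemma solve_eq_sum (a : List Int) :
    solve a = ∑ x ∈ a.toFinset,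
      (if 1 < (a.count x : Int) then (a.count x : Int) * ((a.count x : Int) - 1) else 0) := by
  unfold solve
  rw [loopA (fun x => (a.count x : Int)) a PySem.Dict.empty 0]
  simp [PySem.Dict.contains_empty]

lemma solve_alt_eq_sum (a : List Int) :
    solve_alt a = ∑ x ∈ a.toFinset, (a.count x : Int) * ((a.count x : Int) - 1) := by
  unfold solve_alt
  rw [PySem.Dict.foldl_insert_getD_add_one_eq_counter]
  show (((PySem.Dict.counter a).values).map (fun v => v * (v - 1))).sum
      = ∑ x ∈ a.toFinset, (a.count x : Int) * ((a.count x : Int) - 1)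
  have hv : (PySem.Dict.counter a).values
      = (PySem.Set.ofList a).map (fun k => (a.count k : Int)) := by
    show ((PySem.Dict.counter a).items).map (·.2) = _
    rw [PySem.Dict.items_counter]
    simp [List.map_map, Function.comp]
  rw [hv, List.map_map]
  have hnd : (PySem.Set.ofList a).Nodup := PySem.Set.nodup_ofList a
  have htf : (PySem.Set.ofList a).toFinset = a.toFinset := by
    ext x; simp [PySem.Set.mem_ofList]
  rw [← List.sum_toFinset _ hnd, htf]
  rfl

theorem solve_spec_aux (a : List Int) : solve a = solve_alt a := by
  rw [solve_eq_sum, solve_alt_eq_sum]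
  apply Finset.sum_congr rfl
  intro x hx
  have hmem : x ∈ a := List.mem_toFinset.mp hx
  have hpos : 1 ≤ a.count x := List.one_le_count_iff.mpr hmem
  by_cases hc : 1 < (a.count x : Int)
  · simp [hc]
  · have : a.count x = 1 := by omega
    simp [this]

-- ===== VERDICT (by name: the statement is the Claim_ definition above) =====
theorem solve_spec : Claim_equal_solve := by
  intro a _
  unfold Spec_solve
  exact solve_spec_aux a
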